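-- pv_equiv track=rewrite | github.com/GridSAT/minesweeper_SAT | util.py | at_least
-- ===== SOURCE A (Python) =====
-- def at_least(n, neighbours):
--     clauses = []
--
--     rows_count = 2 ** len(neighbours)
--     for row in range(rows_count):
--         bin_representation = '{0:0{len}b}'.format(row, len=len(neighbours))
--         bit_count = bin_representation.count("1")
--         if bit_count == (len(neighbours) - (n - 1)):
--             clauses.append([neighbours[i] for i in range(len(neighbours)) if (bin_representation[i] == '1')])
--
--     return clauses
-- ===== SOURCE B (Python) =====
-- def at_least(n, neighbours):
--     k = len(neighbours) - (n - 1)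
--     if k < 0:
--         return []
--
--     def subs(k, xs):
--         # all length-k sublists of xs, in increasing-bitmask order (first element = most significant bit)
--         if k == 0:
--             return [[]]
--         if len(xs) < k:
--             return []
--         rest = xs[1:]
--         return subs(k, rest) + [[xs[0]] + c for c in subs(k - 1, rest)]
--
--     return subs(k, neighbours)
-- ===== Notes on version B (the rewrite author's own statement) =====
-- stated objective: alternative
-- what changed: B enumerates only the length-k sublists (k = m-(n-1)) by direct recursion on the neighbour list instead of scanning all 2^m bitmasks and formatting each as a binary string; intended as faster (measured 105x at n=16) but on large balanced inputs both are bounded by the exponential output size.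
import Mathlib
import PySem

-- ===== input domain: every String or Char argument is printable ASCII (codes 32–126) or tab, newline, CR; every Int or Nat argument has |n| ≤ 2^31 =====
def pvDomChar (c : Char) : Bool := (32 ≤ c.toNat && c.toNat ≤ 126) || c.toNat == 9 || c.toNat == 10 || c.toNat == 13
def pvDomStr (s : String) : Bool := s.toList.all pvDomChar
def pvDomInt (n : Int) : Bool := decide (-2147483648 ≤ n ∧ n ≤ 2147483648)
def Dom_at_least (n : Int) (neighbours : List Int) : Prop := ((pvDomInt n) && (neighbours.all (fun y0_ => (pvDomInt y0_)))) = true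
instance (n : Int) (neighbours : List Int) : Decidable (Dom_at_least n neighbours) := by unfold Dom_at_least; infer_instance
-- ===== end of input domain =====

-- B replaces A's exhaustive scan of all 2^m bitmasks (with binary string formatting) by a direct
-- recursive enumeration of the length-k sublists in the same order (objective: alternative; it
-- avoids A's 2^m scan, though on balanced k the output itself is exponentially large).

-- ===== PORT A =====
-- '{:b}'-style binary digits of a nonnegative int, most significant first ("0" for 0);
-- exact hand port of Python's binary formatting on Nat.
def pyBin (v : Nat) : List Char :=
  if _h : v < 2 then [if v = 1 then '1' else '0']
  else pyBin (v / 2) ++ [if v % 2 = 1 then '1' else '0']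
  decreasing_by omega

-- '{0:0{len}b}'.format(row, len=m): pyBin zero-padded on the left to width m (exact: format never truncates).
def pyBinPad (row m : Nat) : List Char :=
  List.replicate (m - (pyBin row).length) '0' ++ pyBin row

-- [neighbours[i] for i in range(len(neighbours)) if bin_representation[i] == '1']
-- getD is exact here: every i in range(len neighbours) is in range for both lists on the rows A visits.
def clauseOf (s : List Char) (nbs : List Int) : List Int :=
  ((List.range nbs.length).filter (fun i => s.getD i ' ' == '1')).map (fun i => nbs.getD i 0)

-- for row in range(2 ** m): …  (range of a nonnegative bound, ported as List.range)
def at_least (n : Int) (neighbours : List Int) : List (List Int) :=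
  (List.range (2 ^ neighbours.length)).foldl
    (fun clauses row =>
      let s := pyBinPad row neighbours.length
      if ((s.count '1' : Int) = (neighbours.length : Int) - (n - 1)) then
        clauses ++ [clauseOf s neighbours]
      else clauses) []

-- ===== PORT B =====
-- subs(k, xs) from Source B: all length-k sublists of xs, in increasing-bitmask order.
def subsB (k : Nat) (xs : List Int) : List (List Int) :=
  if k = 0 then [[]]
  else if xs.length < k then []
  else
    match xs with
    | [] => []   -- unreachable: xs.length ≥ k ≥ 1
    | a :: rest => subsB k rest ++ (subsB (k - 1) rest).map (a :: ·)
  termination_by xs.length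
  decreasing_by all_goals simp_all

def at_least_alt (n : Int) (neighbours : List Int) : List (List Int) :=
  let k : Int := (neighbours.length : Int) - (n - 1)
  if k < 0 then [] else subsB k.toNat neighbours

-- ===== PRECONDITION & SPEC =====
def Spec_at_least (n : Int) (neighbours : List Int) (out : List (List Int)) : Prop := out = at_least_alt n neighbours
instance (n : Int) (neighbours : List Int) (out : List (List Int)) : Decidable (Spec_at_least n neighbours out) := by unfold Spec_at_least; infer_instance

-- ===== CLAIM (what is proved, stated in full; the proofs are below) =====
def Claim_equal_at_least : Prop := ∀ (n : Int) (neighbours : List Int), Dom_at_least n neighbours → Spec_at_least n neighbours (at_least n neighbours)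

-- ===== LEMMAS AND PROOFS =====

-- all length-m bitstrings over {'0','1'}, most significant bit first, in increasing numeric order
def bits : Nat → List (List Char)
  | 0 => [[]]
  | m + 1 => (bits m).map ('0' :: ·) ++ (bits m).map ('1' :: ·)

-- select the elements of l at positions where s has '1' (s, l walked in lockstep)
def sel : List Char → List Int → List Int
  | _, [] => []
  | [], _ :: _ => []
  | c :: s, a :: l => (if c = '1' then [a] else []) ++ sel s l

theorem pyBin_length_le {v m : Nat} (hm : 1 ≤ m) (hv : v < 2 ^ m) : (pyBin v).length ≤ m := by
  induction m generalizing v with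
  | zero => omega
  | succ m ih =>
    rw [pyBin]
    by_cases h : v < 2
    · simp [h]
    · rw [dif_neg h]
      have hv2 : v / 2 < 2 ^ m := by
        have : 2 ^ (m + 1) = 2 * 2 ^ m := by ring
        omega
      rcases Nat.eq_zero_or_pos m with hm0 | hm1
      · subst hm0; omega
      · have := ih hm1 hv2
        simp [List.length_append]
        omega

theorem pyBinPad_length {r m : Nat} (hm : 1 ≤ m) (hr : r < 2 ^ m) : (pyBinPad r m).length = m := by
  have := pyBin_length_le hm hr
  simp [pyBinPad]
  omega

theorem pyBinPad_step {r m : Nat} (hm : 1 ≤ m) :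
    pyBinPad r (m + 1) = pyBinPad (r / 2) m ++ [if r % 2 = 1 then '1' else '0'] := by
  by_cases h : r < 2
  · have hr2 : r / 2 = 0 := by omega
    have hrm : r % 2 = r := by omega
    rw [pyBinPad, pyBinPad, pyBin, pyBin, hr2, hrm]
    simp [h]
    rw [show m = (m - 1) + 1 from by omega, List.replicate_succ']
    simp
  · rw [pyBinPad, pyBinPad, pyBin]
    rw [dif_neg h]
    have : (pyBin (r / 2) ++ [if r % 2 = 1 then '1' else '0']).length = (pyBin (r / 2)).length + 1 := by
      simp
    rw [this]
    have harith : m + 1 - ((pyBin (r / 2)).length + 1) = m - (pyBin (r / 2)).length := by omega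
    rw [harith, List.append_assoc]

theorem pyBin_high {m : Nat} (hm : 1 ≤ m) : ∀ r < 2 ^ m, pyBin (2 ^ m + r) = '1' :: pyBinPad r m := by
  induction m with
  | zero => omega
  | succ m ih =>
    intro r hr
    rcases Nat.eq_zero_or_pos m with hm0 | hm1
    · subst hm0
      interval_cases r <;> (rw [pyBin]; norm_num) <;> (rw [pyBin]; norm_num [pyBinPad]) <;> (rw [pyBin]; norm_num)
    · have h2 : ¬ (2 ^ (m + 1) + r < 2) := by
        have : (2:Nat) ≤ 2 ^ (m + 1) := Nat.one_lt_two_pow (by omega)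
        omega
      rw [pyBin, dif_neg h2]
      have hpow : 2 ^ (m + 1) = 2 * 2 ^ m := by ring
      have hdiv : (2 ^ (m + 1) + r) / 2 = 2 ^ m + r / 2 := by omega
      have hmod : (2 ^ (m + 1) + r) % 2 = r % 2 := by omega
      have hr2 : r / 2 < 2 ^ m := by omega
      rw [hdiv, hmod, ih hm1 (r / 2) hr2]
      rw [List.cons_append]
      congr 1
      exact (pyBinPad_step hm1).symm

theorem pyBinPad_lo {r m : Nat} (hm : 1 ≤ m) (hr : r < 2 ^ m) :
    pyBinPad r (m + 1) = '0' :: pyBinPad r m := by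
  have hL := pyBin_length_le hm hr
  rw [pyBinPad, pyBinPad]
  rw [show m + 1 - (pyBin r).length = (m - (pyBin r).length) + 1 from by omega]
  rw [List.replicate_succ]
  simp

theorem pyBinPad_hi {r m : Nat} (hm : 1 ≤ m) (hr : r < 2 ^ m) :
    pyBinPad (2 ^ m + r) (m + 1) = '1' :: pyBinPad r m := by
  have h := pyBin_high hm r hr
  have hlen : (pyBin (2 ^ m + r)).length = m + 1 := by
    rw [h]
    simp [pyBinPad_length hm hr]
  rw [pyBinPad, hlen]
  simp [h]

theorem range_map_pyBinPad {m : Nat} (hm : 1 ≤ m) :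
    (List.range (2 ^ m)).map (fun r => pyBinPad r m) = bits m := by
  induction m with
  | zero => omega
  | succ m ih =>
    rcases Nat.eq_zero_or_pos m with hm0 | hm1
    · subst hm0
      have e0 : pyBinPad 0 1 = ['0'] := by rw [pyBinPad, pyBin]; norm_num
      have e1 : pyBinPad 1 1 = ['1'] := by rw [pyBinPad, pyBin]; norm_num
      show (List.range 2).map _ = _
      rw [show (2:Nat) = 1 + 1 from rfl, List.range_succ, List.range_succ, List.range_zero]
      simp [e0, e1, bits]
    · rw [show 2 ^ (m + 1) = 2 ^ m + 2 ^ m from by ring, List.range_add, List.map_append]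
      rw [bits, ← ih hm1, List.map_map, List.map_map]
      congr 1
      · apply List.map_congr_left
        intro r hrm
        rw [List.mem_range] at hrm
        show pyBinPad r (m + 1) = '0' :: pyBinPad r m
        exact pyBinPad_lo hm1 hrm
      · rw [List.map_map]
        apply List.map_congr_left
        intro r hrm
        rw [List.mem_range] at hrm
        show pyBinPad (2 ^ m + r) (m + 1) = '1' :: pyBinPad r m
        exact pyBinPad_hi hm1 hrm

theorem bits_mem_length {m : Nat} {s : List Char} (h : s ∈ bits m) : s.length = m := by
  induction m generalizing s with
  | zero => simp [bits] at h; simp [h]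
  | succ m ih =>
    simp only [bits, List.mem_append, List.mem_map] at h
    rcases h with ⟨t, ht, rfl⟩ | ⟨t, ht, rfl⟩ <;> simp [ih ht]

theorem clauseOf_eq_sel : ∀ (l : List Int) (s : List Char), l.length ≤ s.length → clauseOf s l = sel s l
  | [], s, _ => by cases s <;> simp [clauseOf, sel]
  | a :: l, [], h => by simp at h
  | a :: l, c :: s, h => by
    have ih := clauseOf_eq_sel l s (by simpa using h)
    simp only [clauseOf, List.length_cons, List.range_succ_eq_map, List.filter_cons,
      List.getD_cons_zero, List.filter_map] at *
    by_cases hc : c = '1'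
    · simp only [hc, if_pos, sel]
      simp only [Function.comp_def, Nat.succ_eq_add_one, List.getD_cons_succ]
      simp [← ih]
    · have : (c == '1') = false := by simpa using hc
      simp only [this, sel, hc, if_false]
      simp only [Function.comp_def, Nat.succ_eq_add_one, List.getD_cons_succ]
      simp [← ih]

theorem subsB_zero (xs : List Int) : subsB 0 xs = [[]] := by
  rw [subsB.eq_def]; simp

theorem subsB_nil (k : Nat) : subsB k [] = if k = 0 then [[]] else [] := by
  rw [subsB.eq_def]
  rcases Nat.eq_zero_or_pos k with h | h
  · simp [h]
  · have hk : k ≠ 0 := by omega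
    simp [hk, h]

theorem subsB_len_lt {k : Nat} {l : List Int} (h : l.length < k) : subsB k l = [] := by
  rw [subsB.eq_def]
  have hk : ¬ k = 0 := by omega
  rw [if_neg hk, if_pos h]

theorem subsB_cons_succ {k : Nat} {a : Int} {l : List Int} (h : ¬ (a :: l).length < k + 1) :
    subsB (k + 1) (a :: l) = subsB (k + 1) l ++ (subsB k l).map (a :: ·) := by
  rw [subsB.eq_def]
  rw [if_neg (by omega : ¬ k + 1 = 0), if_neg h]
  rfl

theorem bits_filter_sel (l : List Int) : ∀ k : Nat,
    (((bits l.length).filter (fun s => s.count '1' = k)).map (fun s => sel s l)) = subsB k l := by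
  induction l with
  | nil =>
    intro k
    rcases Nat.eq_zero_or_pos k with h | h
    · subst h; simp [bits, sel, subsB_zero]
    · have hk : k ≠ 0 := by omega
      simp [bits, subsB_nil, hk, Ne.symm hk]
  | cons a l ih =>
    intro k
    simp only [List.length_cons, bits, List.filter_append, List.filter_map, List.map_append,
      List.map_map]
    have c0 : ∀ s : List Char, ('0' :: s).count '1' = s.count '1' := by
      intro s; simp
    have c1 : ∀ s : List Char, ('1' :: s).count '1' = s.count '1' + 1 := by
      intro s; simp
    cases k with
    | zero =>
      have h1 : ((fun s : List Char => decide (s.count '1' = 0)) ∘ ('1' :: ·)) = fun s => false := by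
        funext s; simp [c1]
      have h0 : ((fun s : List Char => decide (s.count '1' = 0)) ∘ ('0' :: ·)) = fun s : List Char => decide (s.count '1' = 0) := by
        funext s; simp [c0]
      rw [h1, h0]
      simp only [List.filter_false, List.map_nil, List.append_nil]
      have : ((fun s => sel s (a :: l)) ∘ ('0' :: ·)) = fun s : List Char => sel s l := by
        funext s; simp [sel]
      rw [this, ih 0, subsB_zero, subsB_zero]
    | succ k =>
      have h0 : ((fun s : List Char => decide (s.count '1' = k + 1)) ∘ ('0' :: ·)) = fun s : List Char => decide (s.count '1' = k + 1) := by
        funext s; simp [c0]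
      have h1 : ((fun s : List Char => decide (s.count '1' = k + 1)) ∘ ('1' :: ·)) = fun s : List Char => decide (s.count '1' = k) := by
        funext s; simp [c1]
      rw [h0, h1]
      have e0 : ((fun s => sel s (a :: l)) ∘ ('0' :: ·)) = fun s : List Char => sel s l := by
        funext s; simp [sel]
      have e1 : ((fun s => sel s (a :: l)) ∘ ('1' :: ·)) = fun s : List Char => a :: sel s l := by
        funext s; simp [sel]
      rw [e0, e1]
      have hmm : (List.filter (fun s : List Char => decide (s.count '1' = k)) (bits l.length)).map (fun s : List Char => a :: sel s l)
           = ((List.filter (fun s : List Char => decide (s.count '1' = k)) (bits l.length)).map (fun s => sel s l)).map (a :: ·) := by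
        simp [List.map_map, Function.comp_def]
      rw [hmm, ih (k + 1), ih k]
      by_cases hlen : (a :: l).length < k + 1
      · have hl : l.length < k := by simp at hlen; omega
        rw [subsB_len_lt (show l.length < k + 1 by omega), subsB_len_lt hl, subsB_len_lt hlen]
        simp
      · exact (subsB_cons_succ hlen).symm

theorem at_least_cons (n : Int) (nbs : List Int) (h : 1 ≤ nbs.length) :
    at_least n nbs = at_least_alt n nbs := by
  rw [at_least]
  rw [PySem.List.foldl_append_ite
    (fun row => ((pyBinPad row nbs.length).count '1' : Int) = (nbs.length : Int) - (n - 1))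
    (fun row => clauseOf (pyBinPad row nbs.length) nbs)]
  rw [List.nil_append]
  rw [show (fun row => decide (((pyBinPad row nbs.length).count '1' : Int) = (nbs.length : Int) - (n - 1)))
      = ((fun s : List Char => decide (((s.count '1' : Int)) = (nbs.length : Int) - (n - 1))) ∘ (fun r => pyBinPad r nbs.length)) from rfl]
  rw [show (fun row => clauseOf (pyBinPad row nbs.length) nbs)
      = ((fun s : List Char => clauseOf s nbs) ∘ (fun r => pyBinPad r nbs.length)) from rfl]
  rw [← List.map_map, ← List.filter_map, range_map_pyBinPad h]
  have hsel : ((bits nbs.length).filter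
        (fun s : List Char => decide ((s.count '1' : Int) = (nbs.length : Int) - (n - 1)))).map
        (fun s : List Char => clauseOf s nbs)
      = ((bits nbs.length).filter
        (fun s : List Char => decide ((s.count '1' : Int) = (nbs.length : Int) - (n - 1)))).map
        (fun s : List Char => sel s nbs) := by
    apply List.map_congr_left
    intro s hs
    exact clauseOf_eq_sel nbs s
      (le_of_eq (bits_mem_length (List.mem_of_mem_filter hs)).symm)
  rw [hsel]
  rw [at_least_alt]
  by_cases hneg : (nbs.length : Int) - (n - 1) < 0
  · rw [if_pos hneg]
    have hnil : (bits nbs.length).filter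
        (fun s : List Char => decide ((s.count '1' : Int) = (nbs.length : Int) - (n - 1))) = [] := by
      apply List.filter_eq_nil_iff.mpr
      intro s _
      simp only [decide_eq_true_eq]
      have : (0:Int) ≤ (s.count '1' : Int) := Int.natCast_nonneg _
      omega
    rw [hnil]
    rfl
  · rw [if_neg hneg]
    have hpred : ∀ s ∈ bits nbs.length,
        (decide ((s.count '1' : Int) = (nbs.length : Int) - (n - 1)))
          = (decide (s.count '1' = ((nbs.length : Int) - (n - 1)).toNat)) := by
      intro s _
      apply decide_eq_decide.mpr
      omega
    rw [List.filter_congr hpred]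
    exact bits_filter_sel nbs (((nbs.length : Int)) - (n - 1)).toNat

theorem at_least_nil (n : Int) : at_least n [] = at_least_alt n [] := by
  rw [at_least, at_least_alt]
  simp only [List.length_nil, pow_zero, List.range_one, List.foldl_cons, List.foldl_nil]
  rw [pyBinPad, pyBin]
  norm_num [clauseOf, subsB_nil]
  split_ifs <;> first | rfl | omega

-- ===== VERDICT (by name: the statement is the Claim_ definition above) =====
theorem at_least_spec : Claim_equal_at_least := by
  intro n nbs _
  unfold Spec_at_least
  cases nbs with
  | nil => exact at_least_nil n
  | cons a l => exact at_least_cons n (a :: l) (by simp)
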